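-- pv_equiv track=rewrite | github.com/qiyuanhuadelaide/Python_Code | hw4.py | lst_to_dict
-- ===== SOURCE A (Python) =====
-- def lst_to_dict(lst, l, r):
--     d = {}
--     Len = len(lst)
--     # set every value between l and r is None
--     for i in range(l, r + 1):
--         d[i] = None
--     # traverse lst, update every value between l and r in the dictionary
--     for i in range(Len):
--         if l <= lst[i] <= r:
--             d[lst[i]] = i
--     return d
-- ===== SOURCE B (Python) =====
-- def lst_to_dict(lst, l, r):
--     # Sort the in-range (value, index) pairs, then merge them with
--     # range(l, r+1): one pointer sweeps the sorted pairs; the final pair of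
--     # each value group carries that value's last occurrence index.
--     pairs = sorted((v, i) for i, v in enumerate(lst) if l <= v <= r)
--     d = {}
--     p = 0
--     for k in range(l, r + 1):
--         idx = None
--         while p < len(pairs) and pairs[p][0] == k:
--             idx = pairs[p][1]
--             p += 1
--         d[k] = idx
--     return d
-- ===== Notes on version B (the rewrite author's own statement) =====
-- stated objective: alternative
-- what changed: B replaces A's seed-then-overwrite dict construction (seed every range key with None, then scan the list updating entries in place) with sort-then-merge: it sorts the in-range (value, index) pairs and sweeps them with a single pointer against range(l, r+1), taking the final pair of each value group as the last occurrence.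
import Mathlib
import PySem

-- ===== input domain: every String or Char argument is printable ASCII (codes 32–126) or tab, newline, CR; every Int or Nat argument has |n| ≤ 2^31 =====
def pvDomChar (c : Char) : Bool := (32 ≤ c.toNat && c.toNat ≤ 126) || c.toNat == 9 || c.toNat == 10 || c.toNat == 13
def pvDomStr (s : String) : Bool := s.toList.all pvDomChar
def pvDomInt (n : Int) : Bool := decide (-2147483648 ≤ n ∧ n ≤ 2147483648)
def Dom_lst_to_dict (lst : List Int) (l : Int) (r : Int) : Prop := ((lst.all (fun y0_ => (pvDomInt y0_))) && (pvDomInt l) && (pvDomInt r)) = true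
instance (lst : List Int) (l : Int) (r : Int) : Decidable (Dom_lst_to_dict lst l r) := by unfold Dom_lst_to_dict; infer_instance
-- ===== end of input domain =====

-- B replaces A's seed-then-overwrite dict construction by sort-then-merge:
-- sort the in-range (value, index) pairs, then sweep them once against range(l, r+1).


-- ===== PORT A =====
-- d = {}; for i in range(l, r+1): d[i] = None; for i in range(Len): if l <= lst[i] <= r: d[lst[i]] = i
def lst_to_dict (lst : List Int) (l : Int) (r : Int) : List (Int × Option Int) :=
  let d : PySem.Dict Int (Option Int) := PySem.Dict.empty
  let d := (PySem.List.pyRange l (r + 1)).foldl (fun d i => d.insert i none) d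
  let d := (PySem.List.pyRange 0 (PySem.List.len lst)).foldl
      (fun d i =>
        let v := PySem.List.pyGetD lst i 0   -- lst[i]; i always in range here
        if l ≤ v ∧ v ≤ r then d.insert v (some i) else d) d
  d.items

-- ===== PORT B =====
-- the inner 'while p < len(pairs) and pairs[p][0] == k: idx = pairs[p][1]; p += 1'
-- (the pointer p walking forward = consuming the head of the remaining suffix)
def consumeB (k : Int) (idx : Option Int) : List (Int × Int) → Option Int × List (Int × Int)
  | [] => (idx, [])
  | (v, i) :: t => if v = k then consumeB k (some i) t else (idx, (v, i) :: t)

-- pairs = sorted((v, i) for i, v in enumerate(lst) if l <= v <= r)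
-- d = {}; p = 0; for k in range(l, r+1): <while loop above>; d[k] = idx
def lst_to_dict_alt (lst : List Int) (l : Int) (r : Int) : List (Int × Option Int) :=
  let pairs := PySem.List.sorted2
      (((PySem.List.enumerate lst).filter (fun p => decide (l ≤ p.2) && decide (p.2 ≤ r))).map
        (fun p => (p.2, p.1)))
      Prod.fst Prod.snd
  ((PySem.List.pyRange l (r + 1)).foldl
      (fun st k =>
        let res := consumeB k none st.2
        (st.1 ++ [(k, res.1)], res.2))
      (([] : List (Int × Option Int)), pairs)).1

-- ===== PRECONDITION & SPEC =====
def Spec_lst_to_dict (lst : List Int) (l : Int) (r : Int) (out : List (Int × Option Int)) : Prop := out = lst_to_dict_alt lst l r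
instance (lst : List Int) (l : Int) (r : Int) (out : List (Int × Option Int)) : Decidable (Spec_lst_to_dict lst l r out) := by unfold Spec_lst_to_dict; infer_instance

-- ===== CLAIM (what is proved, stated in full; the proofs are below) =====
def Claim_equal_lst_to_dict : Prop := ∀ (lst : List Int) (l : Int) (r : Int), Dom_lst_to_dict lst l r → Spec_lst_to_dict lst l r (lst_to_dict lst l r)

-- ===== LEMMAS AND PROOFS =====

-- the target value at key k: last index of k in lst, none if absent (reverse-index form)
def Flast (lst : List Int) (k : Int) : Option Int :=
  match PySem.List.index? lst.reverse k with
  | some j => some ((PySem.List.len lst) - 1 - (j : Int))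
  | none => none

-- ---------- A-side: A's dict equals the range keys mapped through Flast ----------

-- A's second loop only inserts keys the dict already contains, so the key list is unchanged.
lemma keys_foldl_guarded_insert (l r : Int) (g : Int → Int) (xs : List Int)
    (d : PySem.Dict Int (Option Int))
    (h : ∀ v : Int, l ≤ v ∧ v ≤ r → d.contains v = true) :
    ((xs.foldl (fun d i => if l ≤ g i ∧ g i ≤ r then d.insert (g i) (some i) else d) d).keys)
      = d.keys := by
  induction xs generalizing d with
  | nil => rfl
  | cons x xs ih =>
    simp only [List.foldl_cons]
    by_cases hc : l ≤ g x ∧ g x ≤ r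
    · rw [if_pos hc, ih]
      · exact PySem.Dict.keys_insert_of_contains d (some x) (h (g x) hc)
      · intro v hv
        rw [PySem.Dict.contains_iff_mem_keys,
          PySem.Dict.keys_insert_of_contains d (some x) (h (g x) hc),
          ← PySem.Dict.contains_iff_mem_keys]
        exact h v hv
    · rw [if_neg hc]; exact ih d h

-- A's first loop: initial dict is range keys, all mapped to none.
lemma items_init (l r : Int) :
    ((PySem.List.pyRange l (r + 1)).foldl
        (fun d i => d.insert i (none : Option Int)) PySem.Dict.empty).items
      = (PySem.List.pyRange l (r + 1)).map (fun i => (i, (none : Option Int))) := by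
  have := PySem.Dict.items_foldl_insert_fresh (PySem.List.pyRange l (r + 1))
      (fun i => i) (fun _ => (none : Option Int)) PySem.Dict.empty
      (by intro a _; exact PySem.Dict.contains_empty a)
      (by simpa using PySem.List.nodup_pyRange_one l (r + 1))
  simpa using this

lemma getD_init (l r : Int) (k : Int) :
    ((PySem.List.pyRange l (r + 1)).foldl
        (fun d i => d.insert i (none : Option Int)) PySem.Dict.empty).getD k none = none := by
  induction PySem.List.pyRange l (r + 1) using List.reverseRecOn with
  | nil => simp [PySem.Dict.getD_empty]
  | append_singleton xs x ih =>
    rw [List.foldl_append, List.foldl_cons, List.foldl_nil, PySem.Dict.getD_insert]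
    split_ifs <;> simp [ih]

-- appending one element does not change the indexed reads below the old length
lemma pyGetD_append_lt (xs : List Int) (x : Int) (i : Int) (h0 : 0 ≤ i) (h1 : i < xs.length) :
    PySem.List.pyGetD (xs ++ [x]) i 0 = PySem.List.pyGetD xs i 0 := by
  rw [PySem.List.pyGetD_eq_getElem (xs ++ [x]) 0 h0 (by simp; omega),
      PySem.List.pyGetD_eq_getElem xs 0 h0 (by simpa using h1)]
  exact List.getElem_append_left (by omega)

-- A's second loop, read at a key k of the range, computes exactly Flast lst k.
lemma getD_foldl_last (l r : Int) (lst : List Int) (k : Int) (hk : l ≤ k ∧ k ≤ r)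
    (d : PySem.Dict Int (Option Int)) (hd : d.getD k none = none) :
    ((PySem.List.pyRange 0 (PySem.List.len lst)).foldl
        (fun d i =>
          if l ≤ PySem.List.pyGetD lst i 0 ∧ PySem.List.pyGetD lst i 0 ≤ r
          then d.insert (PySem.List.pyGetD lst i 0) (some i) else d) d).getD k none
      = Flast lst k := by
  induction lst using List.reverseRecOn generalizing d with
  | nil => simpa [Flast, PySem.List.index?_eq_idxOf?] using hd
  | append_singleton xs x ih =>
    have hlen : PySem.List.len (xs ++ [x]) = PySem.List.len xs + 1 := by
      simp [PySem.List.len_eq]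
    have hsplit : PySem.List.pyRange 0 (PySem.List.len (xs ++ [x]))
        = PySem.List.pyRange 0 (PySem.List.len xs) ++ [PySem.List.len xs] := by
      rw [hlen]
      exact PySem.List.pyRange_one_succ_right (by simp [PySem.List.len_eq])
    have hx : PySem.List.pyGetD (xs ++ [x]) (PySem.List.len xs) 0 = x := by
      rw [PySem.List.pyGetD_eq_getElem (xs ++ [x]) 0 (by simp [PySem.List.len_eq])
        (by simp [PySem.List.len_eq])]
      simp [PySem.List.len_eq]
    have hcongr : (PySem.List.pyRange 0 (PySem.List.len xs)).foldl
        (fun d i =>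
          if l ≤ PySem.List.pyGetD (xs ++ [x]) i 0 ∧ PySem.List.pyGetD (xs ++ [x]) i 0 ≤ r
          then d.insert (PySem.List.pyGetD (xs ++ [x]) i 0) (some i) else d) d
        = (PySem.List.pyRange 0 (PySem.List.len xs)).foldl
        (fun d i =>
          if l ≤ PySem.List.pyGetD xs i 0 ∧ PySem.List.pyGetD xs i 0 ≤ r
          then d.insert (PySem.List.pyGetD xs i 0) (some i) else d) d := by
      apply PySem.List.foldl_congr_mem
      intro a i hi
      have hmem := (PySem.List.mem_pyRange_one).1 hi
      rw [pyGetD_append_lt xs x i hmem.1 (by simp [PySem.List.len_eq] at hmem ⊢; omega)]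
    rw [hsplit, List.foldl_append, List.foldl_cons, List.foldl_nil, hcongr, hx]
    unfold Flast
    rw [List.reverse_append, List.reverse_singleton, List.singleton_append]
    by_cases hxk : x = k
    · subst hxk
      rw [if_pos hk, PySem.Dict.getD_insert, if_pos rfl,
        PySem.List.index?_cons_self]
      simp
    · have hidx : PySem.List.index? (x :: xs.reverse) k
          = (PySem.List.index? xs.reverse k).map (· + 1) :=
        PySem.List.index?_cons_of_ne xs.reverse hxk
      have hIH := ih d hd
      unfold Flast at hIH
      by_cases hc : l ≤ x ∧ x ≤ r
      · rw [if_pos hc, PySem.Dict.getD_insert, if_neg (by omega), hIH, hidx]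
        cases PySem.List.index? xs.reverse k with
        | none => rfl
        | some j => simp; ring
      · rw [if_neg hc, hIH, hidx]
        cases PySem.List.index? xs.reverse k with
        | none => rfl
        | some j => simp; ring

-- A's result, packaged: the range keys each mapped through Flast.
lemma A_eq_map (lst : List Int) (l r : Int) :
    lst_to_dict lst l r
      = (PySem.List.pyRange l (r + 1)).map (fun k => (k, Flast lst k)) := by
  unfold lst_to_dict
  dsimp only
  set d1 := (PySem.List.pyRange l (r + 1)).foldl
      (fun d i => d.insert i (none : Option Int)) PySem.Dict.empty with hd1
  have hkeys1 : d1.keys = PySem.List.pyRange l (r + 1) := by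
    rw [hd1, PySem.Dict.keys, items_init l r, List.map_map]
    exact List.map_id _
  set d2 := (PySem.List.pyRange 0 (PySem.List.len lst)).foldl
      (fun d i =>
        if l ≤ PySem.List.pyGetD lst i 0 ∧ PySem.List.pyGetD lst i 0 ≤ r
        then d.insert (PySem.List.pyGetD lst i 0) (some i) else d) d1 with hd2
  have hkeys2 : d2.keys = PySem.List.pyRange l (r + 1) := by
    rw [hd2, keys_foldl_guarded_insert l r (fun i => PySem.List.pyGetD lst i 0) _ d1, hkeys1]
    intro v hv
    rw [PySem.Dict.contains_iff_mem_keys, hkeys1, PySem.List.mem_pyRange_one]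
    omega
  have hnd : d2.keys.Nodup := by rw [hkeys2]; exact PySem.List.nodup_pyRange_one l (r + 1)
  rw [PySem.Dict.items_eq_map_keys d2 hnd none, hkeys2]
  apply List.map_congr_left
  intro k hkmem
  have hk := (PySem.List.mem_pyRange_one).1 hkmem
  have : d2.getD k none = Flast lst k := by
    rw [hd2]
    exact getD_foldl_last l r lst k ⟨hk.1, by omega⟩ d1 (by rw [hd1]; exact getD_init l r k)
  rw [this]

-- ---------- B-side: the sort-then-merge fold equals the same map ----------

-- the boolean "before" comparison sorted2 uses for key (fst, snd)
def lexBefore (p q : Int × Int) : Bool :=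
  decide (p.1 < q.1) || (!decide (q.1 < p.1) && decide (p.2 < q.2))

lemma lexBefore_iff (p q : Int × Int) :
    lexBefore p q = true ↔ (p.1 < q.1 ∨ (¬ q.1 < p.1 ∧ p.2 < q.2)) := by
  simp [lexBefore]

lemma sorted2_eq_foldl (xs : List (Int × Int)) :
    PySem.List.sorted2 xs Prod.fst Prod.snd
      = xs.foldl (fun acc x => PySem.List.insertBy lexBefore x acc) [] := rfl

lemma insertBy_nil (before : Int × Int → Int × Int → Bool) (x : Int × Int) :
    PySem.List.insertBy before x [] = [x] := rfl

lemma insertBy_cons (before : Int × Int → Int × Int → Bool) (x y : Int × Int)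
    (ys : List (Int × Int)) :
    PySem.List.insertBy before x (y :: ys)
      = if before x y then x :: y :: ys else y :: PySem.List.insertBy before x ys := rfl

-- insertion keeps the "never before" pairwise order
lemma pairwise_insertBy_lex (x : Int × Int) (ys : List (Int × Int))
    (h : ys.Pairwise (fun a b => lexBefore b a = false)) :
    (PySem.List.insertBy lexBefore x ys).Pairwise (fun a b => lexBefore b a = false) := by
  induction ys with
  | nil => simp [insertBy_nil]
  | cons y ys ih =>
    rw [insertBy_cons]
    rcases List.pairwise_cons.1 h with ⟨hy, ht⟩
    by_cases hb : lexBefore x y = true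
    · rw [if_pos hb]
      refine List.pairwise_cons.2 ⟨?_, h⟩
      intro z hz
      rcases List.mem_cons.1 hz with rfl | hz
      · rw [← Bool.not_eq_true]
        intro hyx
        rw [lexBefore_iff] at hb hyx
        omega
      · have hyz : lexBefore z y = false := hy z hz
        rw [← Bool.not_eq_true]
        intro hzx
        rw [lexBefore_iff] at hb hzx
        rw [← Bool.not_eq_true, lexBefore_iff] at hyz
        omega
    · rw [if_neg hb]
      refine List.pairwise_cons.2 ⟨?_, ih ht⟩
      intro z hz
      rcases (PySem.List.insertBy_mem_iff lexBefore x z ys).1 hz with rfl | hz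
      · exact Bool.not_eq_true _ ▸ hb
      · exact hy z hz
  
lemma pairwise_foldl_insertBy_lex (xs : List (Int × Int)) (init : List (Int × Int))
    (h : init.Pairwise (fun a b => lexBefore b a = false)) :
    (xs.foldl (fun acc x => PySem.List.insertBy lexBefore x acc) init).Pairwise
      (fun a b => lexBefore b a = false) := by
  induction xs generalizing init with
  | nil => exact h
  | cons x xs ih => exact ih _ (pairwise_insertBy_lex x init h)

-- equation lemmas for the while-loop consumer
lemma consumeB_nil (k : Int) (idx : Option Int) : consumeB k idx [] = (idx, []) := rfl

lemma consumeB_cons (k : Int) (idx : Option Int) (v i : Int) (t : List (Int × Int)) :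
    consumeB k idx ((v, i) :: t)
      = if v = k then consumeB k (some i) t else (idx, (v, i) :: t) := rfl

-- on a fst-sorted suffix whose keys are all ≥ k, the while loop consumes exactly
-- the fst = k group (its last snd wins) and leaves the keys ≥ k+1
lemma consume_spec (k : Int) (qs : List (Int × Int))
    (hs : qs.Pairwise (fun p q => p.1 ≤ q.1)) (hall : ∀ p ∈ qs, k ≤ p.1) (idx : Option Int) :
    consumeB k idx qs
      = ((qs.filter (fun p => decide (p.1 = k))).foldl (fun _ p => some p.2) idx,
         qs.filter (fun p => decide (k + 1 ≤ p.1))) := by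
  induction qs generalizing idx with
  | nil => simp [consumeB_nil]
  | cons q t ih =>
    obtain ⟨v, i⟩ := q
    rcases List.pairwise_cons.1 hs with ⟨hq, ht⟩
    by_cases hv : v = k
    · subst hv
      rw [consumeB_cons, if_pos rfl,
        ih ht (fun p hp => hall p (List.mem_cons_of_mem _ hp)) (some i)]
      have h1 : ((v, i) :: t).filter (fun p => decide (p.1 = v))
          = (v, i) :: t.filter (fun p => decide (p.1 = v)) := by
        simp
      have h2 : ((v, i) :: t).filter (fun p => decide (v + 1 ≤ p.1))
          = t.filter (fun p => decide (v + 1 ≤ p.1)) := by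
        simp
      rw [h1, h2, List.foldl_cons]
    · have hkv : k < v := lt_of_le_of_ne (hall (v, i) List.mem_cons_self) (fun h => hv h.symm)
      rw [consumeB_cons, if_neg hv]
      have h1 : ((v, i) :: t).filter (fun p => decide (p.1 = k)) = [] := by
        rw [List.filter_cons, if_neg (by simp; omega)]
        rw [List.filter_eq_nil_iff]
        intro p hp
        have := hq p hp
        simp
        omega
      have h2 : ((v, i) :: t).filter (fun p => decide (k + 1 ≤ p.1)) = (v, i) :: t := by
        rw [List.filter_eq_self]
        intro p hp
        rcases List.mem_cons.1 hp with rfl | hp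
        · simp; omega
        · have := hq p hp; simp; omega
      rw [h1, h2, List.foldl_nil]

-- the whole merge loop, by induction on the range
lemma loop_spec (ps : List (Int × Int)) (hpw : ps.Pairwise (fun a b => lexBefore b a = false)) :
    ∀ (a b : Int), a ≤ b → ∀ (acc : List (Int × Option Int)),
    ((PySem.List.pyRange a b).foldl
        (fun st k =>
          let res := consumeB k none st.2
          (st.1 ++ [(k, res.1)], res.2))
        (acc, ps.filter (fun p => decide (a ≤ p.1))))
      = (acc ++ (PySem.List.pyRange a b).map
            (fun k => (k, (ps.filter (fun p => decide (p.1 = k))).foldl (fun _ p => some p.2) none)),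
         ps.filter (fun p => decide (b ≤ p.1))) := by
  have hfst : ps.Pairwise (fun p q : Int × Int => p.1 ≤ q.1) := by
    refine hpw.imp ?_
    intro a b hab
    rw [← Bool.not_eq_true, lexBefore_iff] at hab
    omega
  intro a b hab
  induction hn : (b - a).toNat generalizing a with
  | zero =>
    intro acc
    have hba : b = a := by omega
    subst hba
    rw [PySem.List.pyRange_one_eq_nil le_rfl]
    simp
  | succ n ihn =>
    intro acc
    rw [PySem.List.pyRange_one_cons (by omega), List.foldl_cons, List.map_cons]
    have hsub : (ps.filter (fun p => decide (a ≤ p.1))).Pairwise (fun p q : Int × Int => p.1 ≤ q.1) :=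
      hfst.sublist List.filter_sublist
    have hall : ∀ p ∈ ps.filter (fun p => decide (a ≤ p.1)), a ≤ p.1 := by
      intro p hp
      have := List.of_mem_filter hp
      simpa using this
    rw [consume_spec a _ hsub hall none]
    have hff : (ps.filter (fun p => decide (a ≤ p.1))).filter (fun p => decide (p.1 = a))
        = ps.filter (fun p => decide (p.1 = a)) := by
      rw [List.filter_filter]
      apply List.filter_congr
      intro p _
      simp
      omega
    have hfs : (ps.filter (fun p => decide (a ≤ p.1))).filter (fun p => decide (a + 1 ≤ p.1))
        = ps.filter (fun p => decide (a + 1 ≤ p.1)) := by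
      rw [List.filter_filter]
      apply List.filter_congr
      intro p _
      simp
      omega
    rw [hff, hfs]
    rw [ihn (a + 1) (by omega) (by omega) (acc ++ [(a, (ps.filter (fun p => decide (p.1 = a))).foldl (fun _ p => some p.2) none)])]
    rw [List.append_assoc]
    rfl

-- fold that keeps the newest value = the last element (or the default)
lemma foldl_some_last (g : List (Int × Int)) (idx : Option Int) :
    g.foldl (fun _ p => some p.2) idx
      = match g.getLast? with | some p => some p.2 | none => idx := by
  induction g using List.reverseRecOn with
  | nil => rfl
  | append_singleton t x _ => rw [List.foldl_append, List.getLast?_concat]; rfl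

-- a Pairwise list bounds everything by its last element
lemma pairwise_le_getLast (S : Int × Int → Int × Int → Prop) (g : List (Int × Int))
    (hpw : g.Pairwise S) (p : Int × Int) (h : g.getLast? = some p) :
    ∀ q ∈ g, q = p ∨ S q p := by
  induction g with
  | nil => simp at h
  | cons x t ih =>
    rcases List.pairwise_cons.1 hpw with ⟨hx, ht⟩
    cases t with
    | nil =>
      simp at h
      intro q hq
      rcases List.mem_singleton.1 hq with rfl
      exact Or.inl h
    | cons y t' =>
      have hlast : (y :: t').getLast? = some p := by
        simpa using h
      intro q hq
      rcases List.mem_cons.1 hq with rfl | hq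
      · right
        exact hx p (List.mem_of_getLast? hlast)
      · exact ih ht hlast q hq

-- the last element of the fst = k group is the last occurrence of k in lst
lemma group_last_eq_Flast (lst : List Int) (k : Int) (g : List (Int × Int))
    (hmem : ∀ p : Int × Int, p ∈ g ↔
      (p.1 = k ∧ ∃ (m : Nat) (_ : m < lst.length), p.2 = (m : Int) ∧ lst[m] = k))
    (hpw : g.Pairwise (fun p q => p.2 ≤ q.2)) :
    (match g.getLast? with | some p => some p.2 | none => (none : Option Int)) = Flast lst k := by
  unfold Flast
  cases hg : g.getLast? with
  | none =>
    have hnil : g = [] := List.getLast?_eq_none_iff.1 hg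
    have hnk : k ∉ lst := by
      intro hk
      rcases List.mem_iff_getElem.1 hk with ⟨m, hm, hval⟩
      have : (k, (m : Int)) ∈ g := (hmem (k, (m : Int))).2 ⟨rfl, m, hm, rfl, hval⟩
      rw [hnil] at this
      exact absurd this (List.not_mem_nil)
    have : PySem.List.index? lst.reverse k = none :=
      (PySem.List.index?_eq_none_iff lst.reverse k).2 (by simpa using hnk)
    rw [this]
  | some p =>
    have hp : p ∈ g := List.mem_of_getLast? hg
    rcases (hmem p).1 hp with ⟨hpk, m, hm, hpm, hval⟩
    -- maximality of m among occurrences of k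
    have hmax : ∀ (m' : Nat) (hm' : m' < lst.length), lst[m'] = k → m' ≤ m := by
      intro m' hm' hval'
      have hmem' : (k, (m' : Int)) ∈ g := (hmem (k, (m' : Int))).2 ⟨rfl, m', hm', rfl, hval'⟩
      rcases pairwise_le_getLast _ g hpw p hg _ hmem' with heq | hle
      · have : ((m' : Nat) : Int) = p.2 := congrArg Prod.snd heq
        omega
      · simp only [hpm] at hle
        exact_mod_cast hle
    -- k occurs, so index? on the reverse finds some j
    have hkmem : k ∈ lst.reverse := by
      rw [List.mem_reverse]
      exact List.mem_iff_getElem.2 ⟨m, hm, hval⟩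
    have hsome : (PySem.List.index? lst.reverse k).isSome :=
      (PySem.List.index?_isSome_iff lst.reverse k).2 hkmem
    rcases Option.isSome_iff_exists.1 hsome with ⟨j, hj⟩
    rw [hj]
    rcases PySem.List.getElem_of_index?_eq_some hj with ⟨hjlen, hjval, hjmin⟩
    have hn : lst.reverse.length = lst.length := List.length_reverse
    have hjlt : j < lst.length := hn ▸ hjlen
    have hocc : lst[lst.length - 1 - j]'(by omega) = k := by
      rw [← hjval]
      rw [List.getElem_reverse]
    -- m ≤ lst.length - 1 - j : otherwise reverse would have a hit before j
    have h1 : m ≤ lst.length - 1 - j := by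
      by_contra hcon
      push Not at hcon
      have hrev : lst.reverse[lst.length - 1 - m]'(by omega) = lst[m] := by
        rw [List.getElem_reverse]
        congr 1
        omega
      exact hjmin (lst.length - 1 - m) (by omega) (by rw [hrev, hval])
    -- lst.length - 1 - j ≤ m : maximality
    have h2 : lst.length - 1 - j ≤ m := hmax _ (by omega) hocc
    have hmj : m = lst.length - 1 - j := by omega
    show some p.2 = some (PySem.List.len lst - 1 - (j : Int))
    rw [hpm, hmj]
    simp [PySem.List.len_eq]
    omega

-- membership in the sorted pair list = an in-range occurrence
lemma mem_pairs_iff (lst : List Int) (l r : Int) (p : Int × Int) :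
    p ∈ PySem.List.sorted2
        (((PySem.List.enumerate lst).filter (fun q => decide (l ≤ q.2) && decide (q.2 ≤ r))).map
          (fun q => (q.2, q.1)))
        Prod.fst Prod.snd
      ↔ (l ≤ p.1 ∧ p.1 ≤ r ∧ ∃ (m : Nat) (_ : m < lst.length), p.2 = (m : Int) ∧ lst[m] = p.1) := by
  rw [(PySem.List.sorted2_perm _ Prod.fst Prod.snd false).mem_iff]
  simp only [List.mem_map, List.mem_filter]
  constructor
  · rintro ⟨q, ⟨hqe, hqr⟩, rfl⟩
    rcases (PySem.List.mem_enumerate_iff _ 0 q).1 hqe with ⟨m, hm, rfl⟩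
    simp only [Bool.and_eq_true, decide_eq_true_eq] at hqr
    refine ⟨by simpa using hqr.1, by simpa using hqr.2, m, hm, by simp, by simp⟩
  · rintro ⟨hl, hr, m, hm, hpm, hval⟩
    obtain ⟨p1, p2⟩ := p
    simp only at hpm hval hl hr
    refine ⟨((0 : Int) + (m : Int), p1), ⟨?_, by simp [hl, hr]⟩, by simp [hpm]⟩
    exact (PySem.List.mem_enumerate_iff _ 0 _).2 ⟨m, hm, by simp [hval]⟩

-- B's result, packaged: the same map
lemma B_eq_map (lst : List Int) (l r : Int) :
    lst_to_dict_alt lst l r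
      = (PySem.List.pyRange l (r + 1)).map (fun k => (k, Flast lst k)) := by
  unfold lst_to_dict_alt
  dsimp only
  by_cases hlr : l ≤ r + 1
  · set ps := PySem.List.sorted2
        (((PySem.List.enumerate lst).filter (fun q => decide (l ≤ q.2) && decide (q.2 ≤ r))).map
          (fun q => (q.2, q.1)))
        Prod.fst Prod.snd with hps
    have hpw : ps.Pairwise (fun a b => lexBefore b a = false) := by
      rw [hps, sorted2_eq_foldl]
      exact pairwise_foldl_insertBy_lex _ [] (List.Pairwise.nil)
    have hinit : ps.filter (fun p => decide (l ≤ p.1)) = ps := by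
      rw [List.filter_eq_self]
      intro p hp
      have := (mem_pairs_iff lst l r p).1 (hps ▸ hp)
      simp
      exact this.1
    rw [← hinit, loop_spec ps hpw l (r + 1) hlr []]
    simp only [List.nil_append]
    apply List.map_congr_left
    intro k hkmem
    have hk := (PySem.List.mem_pyRange_one).1 hkmem
    have hgmem : ∀ p : Int × Int, p ∈ ps.filter (fun p => decide (p.1 = k)) ↔
        (p.1 = k ∧ ∃ (m : Nat) (_ : m < lst.length), p.2 = (m : Int) ∧ lst[m] = k) := by
      intro p
      rw [List.mem_filter]
      constructor
      · rintro ⟨hp, hpk⟩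
        have hpk' : p.1 = k := by simpa using hpk
        rcases (mem_pairs_iff lst l r p).1 (hps ▸ hp) with ⟨_, _, m, hm, hpm, hval⟩
        exact ⟨hpk', m, hm, hpm, hpk' ▸ hval⟩
      · rintro ⟨hpk, m, hm, hpm, hval⟩
        refine ⟨hps ▸ (mem_pairs_iff lst l r p).2 ⟨by omega, by omega, m, hm, hpm, hpk ▸ hval⟩, by simpa using hpk⟩
    have hgpw : (ps.filter (fun p => decide (p.1 = k))).Pairwise (fun p q => p.2 ≤ q.2) := by
      have hsub : (ps.filter (fun p => decide (p.1 = k))).Pairwise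
          (fun a b => lexBefore b a = false) := hpw.sublist List.filter_sublist
      refine hsub.imp_of_mem ?_
      intro a b ha hb hab
      have hak : a.1 = k := by have := (List.mem_filter.1 ha).2; simpa using this
      have hbk : b.1 = k := by have := (List.mem_filter.1 hb).2; simpa using this
      rw [← Bool.not_eq_true, lexBefore_iff] at hab
      omega
    rw [foldl_some_last, group_last_eq_Flast lst k _ hgmem hgpw]
  · rw [PySem.List.pyRange_one_eq_nil (by omega)]
    simp

-- ===== VERDICT (by name: the statement is the Claim_ definition above) =====
theorem lst_to_dict_spec : Claim_equal_lst_to_dict := by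
  intro lst l r _
  unfold Spec_lst_to_dict
  rw [A_eq_map, B_eq_map]
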